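-- pv_equiv track=rewrite | github.com/JKomskis/Resume | src/create_resume.py | shorten_uris
-- ===== SOURCE A (Python) =====
-- def nested_get(data, keys):
--     for key in keys:
--         if data is None:
--             return None
--         data = data.get(key)
--     return data
--
-- def nested_set(data, keys, value):
--     for key in keys[:-1]:
--         data = data.setdefault(key, {})
--     data[keys[-1]] = value
--
-- def shorten_uris(resume_data):
--     uri_keys = [["info", "github"], ["info", "website"], ["contact", "linkedin"]]
--
--     for key in uri_keys:
--         full_uri = nested_get(resume_data, key)
--         if full_uri is not None:
--             short_uri_key = key[:-1] + [key[-1] + "_short"]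
--             nested_set(resume_data, short_uri_key, full_uri.split("://")[-1])
--
--     return resume_data
-- ===== SOURCE B (Python) =====
-- def shorten_uris(resume_data):
--     wanted = {"info": ("github", "website"), "contact": ("linkedin",)}
--     for name, section in resume_data.items():
--         for field in wanted.get(name, ()):
--             uri = section.get(field)
--             if uri is not None:
--                 section[field + "_short"] = uri.split("://")[-1]
--     return resume_data
-- ===== Notes on version B (the rewrite author's own statement) =====
-- stated objective: simpler
-- what changed: B is data-driven instead of key-driven: it makes one pass over the resume's sections and folds each section over its wanted fields from a small table, instead of A's per-key-path nested_get/setdefault/nested_set traversal; the result is proved independent of the traversal order.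
import Mathlib
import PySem

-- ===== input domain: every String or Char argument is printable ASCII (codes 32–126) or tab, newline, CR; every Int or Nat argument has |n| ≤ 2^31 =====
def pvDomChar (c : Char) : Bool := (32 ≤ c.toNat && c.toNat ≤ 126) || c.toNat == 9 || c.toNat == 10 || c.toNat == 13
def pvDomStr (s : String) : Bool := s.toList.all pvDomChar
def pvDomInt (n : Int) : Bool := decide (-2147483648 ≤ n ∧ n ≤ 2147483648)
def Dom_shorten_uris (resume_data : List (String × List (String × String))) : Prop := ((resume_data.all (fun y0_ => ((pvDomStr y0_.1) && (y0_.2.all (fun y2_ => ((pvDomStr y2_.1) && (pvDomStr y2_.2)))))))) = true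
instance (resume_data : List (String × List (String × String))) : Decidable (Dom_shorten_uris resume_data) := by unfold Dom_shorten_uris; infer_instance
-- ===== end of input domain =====

-- B replaces A's key-driven nested_get/nested_set lookups (one per key path) by a single
-- data-driven pass over the resume's sections, shortening each section's wanted fields from a
-- small table (objective: simpler; the result is proved independent of the traversal order).
-- Both Pythons mutate resume_data in place identically; the equivalence proved is about the
-- returned value.

-- ===== PORT A =====
-- Source A's nested_get / nested_set, specialised to the two-level key lists this
-- function passes them (the variable-depth Python helpers are untypable as-is).
def nested_get (data : List (String × List (String × String))) (k1 k2 : String) : Option String :=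
  match (PySem.Dict.mk data).get? k1 with
  | none => none
  | some inner => (PySem.Dict.mk inner).get? k2

def nested_set (data : List (String × List (String × String))) (k1 k2 : String) (v : String) :
    List (String × List (String × String)) :=
  -- data = data.setdefault(k1, {}); data[k2] = v  (in-place mutation of the inner dict)
  let inner := (PySem.Dict.mk data).getD k1 []
  ((PySem.Dict.mk data).insert k1 ((PySem.Dict.mk inner).insert k2 v).items).items

def shorten_uris (resume_data : List (String × List (String × String))) : List (String × List (String × String)) :=
  let uri_keys : List (String × String) := [("info", "github"), ("info", "website"), ("contact", "linkedin")]
  uri_keys.foldl (fun rd key =>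
    match nested_get rd key.1 key.2 with
    | none => rd
    | some full_uri =>
        nested_set rd key.1 (key.2 ++ "_short") (PySem.List.pyGetD ((PySem.Str.split? full_uri "://").getD []) (-1) ""))
    resume_data

-- ===== PORT B =====
-- inner loop body: uri = section.get(field); if uri is not None:
--   section[field + "_short"] = uri.split("://")[-1]   (in-place mutation of the section dict)
def shorten_field (sec : List (String × String)) (field : String) : List (String × String) :=
  match (PySem.Dict.mk sec).get? field with
  | none => sec
  | some uri =>
      ((PySem.Dict.mk sec).insert (field ++ "_short") (PySem.List.pyGetD ((PySem.Str.split? uri "://").getD []) (-1) "")).items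

-- wanted = {"info": ("github", "website"), "contact": ("linkedin",)}
def pvWanted : PySem.Dict String (List String) :=
  PySem.Dict.mk [("info", ["github", "website"]), ("contact", ["linkedin"])]

-- for name, section in resume_data.items(): for field in wanted.get(name, ()): …
def shorten_uris_alt (resume_data : List (String × List (String × String))) : List (String × List (String × String)) :=
  resume_data.map (fun p => (p.1, (pvWanted.getD p.1 []).foldl shorten_field p.2))

-- ===== PRECONDITION & SPEC =====
-- Pre_ excludes association lists with a duplicated key (outer or inside a section):
-- they do not represent a Python dict (Python collapses duplicates before A ever runs),
-- so no behaviour of A is specified on them.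
def Pre_shorten_uris (resume_data : List (String × List (String × String))) : Prop :=
  (resume_data.map Prod.fst).Nodup ∧ ∀ p ∈ resume_data, (p.2.map Prod.fst).Nodup
instance (resume_data : List (String × List (String × String))) : Decidable (Pre_shorten_uris resume_data) := by
  unfold Pre_shorten_uris; infer_instance

def pvWitness_shorten_uris : (List (String × List (String × String))) :=
  [("info", [("github", "https://github.com/x")]), ("contact", [])]

def Spec_shorten_uris (resume_data : List (String × List (String × String))) (out : List (String × List (String × String))) : Prop := out = shorten_uris_alt resume_data
instance (resume_data : List (String × List (String × String))) (out : List (String × List (String × String))) : Decidable (Spec_shorten_uris resume_data out) := by unfold Spec_shorten_uris; infer_instance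

-- ===== CLAIM (what is proved, stated in full; the proofs are below) =====
def Claim_equal_shorten_uris : Prop := ∀ (resume_data : List (String × List (String × String))), Dom_shorten_uris resume_data → Pre_shorten_uris resume_data → Spec_shorten_uris resume_data (shorten_uris resume_data)

-- ===== LEMMAS AND PROOFS =====

-- The per-pair rewrite of the whole list keeps the outer key sequence unchanged.
theorem map_fst_stepB (rd : List (String × List (String × String))) (kv : String × String) :
    ((rd.map (fun p => if p.1 == kv.1 then (p.1, shorten_field p.2 kv.2) else p)).map Prod.fst)
      = rd.map Prod.fst := by
  rw [List.map_map]
  refine List.map_congr_left (fun p _ => ?_)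
  by_cases h : p.1 = kv.1 <;> simp [h]

-- A's nested_get/nested_set step equals the whole-list rewrite for that pair,
-- given distinct outer keys.
theorem step_eq (rd : List (String × List (String × String))) (kv : String × String)
    (h : (rd.map Prod.fst).Nodup) :
    (match nested_get rd kv.1 kv.2 with
     | none => rd
     | some full_uri =>
         nested_set rd kv.1 (kv.2 ++ "_short") (PySem.List.pyGetD ((PySem.Str.split? full_uri "://").getD []) (-1) ""))
      = rd.map (fun p => if p.1 == kv.1 then (p.1, shorten_field p.2 kv.2) else p) := by
  unfold nested_get
  cases hg : (PySem.Dict.mk rd).get? kv.1 with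
  | none =>
      have hnotin : kv.1 ∉ rd.map Prod.fst := by
        have hk := (PySem.Dict.get?_eq_none_iff_not_mem_keys (d := PySem.Dict.mk rd) (k := kv.1)).mp hg
        simpa [PySem.Dict.keys] using hk
      have hid : ∀ p ∈ rd, (if p.1 == kv.1 then (p.1, shorten_field p.2 kv.2) else p) = p := by
        intro p hp
        have hne : p.1 ≠ kv.1 := fun e => hnotin (e ▸ List.mem_map_of_mem hp)
        simp [hne]
      rw [List.map_congr_left hid]
      simp
  | some inner =>
      have hval : ∀ p ∈ rd, p.1 = kv.1 → p.2 = inner := by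
        intro p hp hpk
        have h1 : (PySem.Dict.mk rd).get? p.1 = some p.2 :=
          PySem.Dict.get?_of_mem_items _ (by simpa using hp) (by simpa [PySem.Dict.keys] using h)
        rw [hpk, hg] at h1
        exact (Option.some.inj h1).symm
      cases hf : (PySem.Dict.mk inner).get? kv.2 with
      | none =>
          have hid : ∀ p ∈ rd, (if p.1 == kv.1 then (p.1, shorten_field p.2 kv.2) else p) = p := by
            intro p hp
            by_cases hpk : p.1 = kv.1
            · obtain ⟨a, b⟩ := p
              have h2 := hval _ hp hpk
              simp only at hpk h2
              subst hpk; subst h2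
              simp [shorten_field, hf]
            · simp [hpk]
          rw [List.map_congr_left hid]
          simp [hf]
      | some uri =>
          simp only [hf]
          unfold nested_set
          have hgD : (PySem.Dict.mk rd).getD kv.1 [] = inner :=
            PySem.Dict.getD_of_get?_eq_some _ _ hg
          have hc : (PySem.Dict.mk rd).contains kv.1 = true := by
            rw [PySem.Dict.contains_eq_isSome_get?, hg]; rfl
          rw [hgD, PySem.Dict.items_insert_of_contains _ _ hc]
          refine List.map_congr_left (fun p hp => ?_)
          by_cases hpk : p.1 = kv.1
          · obtain ⟨a, b⟩ := p
            have h2 := hval _ hp hpk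
            simp only at hpk h2
            subst hpk; subst h2
            simp [shorten_field, hf]
          · simp [hpk]

-- A's key-driven foldl equals the sequence of whole-list rewrites.
theorem foldl_eq (ks : List (String × String)) (rd : List (String × List (String × String)))
    (h : (rd.map Prod.fst).Nodup) :
    ks.foldl (fun rd key =>
      match nested_get rd key.1 key.2 with
      | none => rd
      | some full_uri =>
          nested_set rd key.1 (key.2 ++ "_short") (PySem.List.pyGetD ((PySem.Str.split? full_uri "://").getD []) (-1) "")) rd
      = ks.foldl (fun rd kv => rd.map (fun p => if p.1 == kv.1 then (p.1, shorten_field p.2 kv.2) else p)) rd := by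
  induction ks generalizing rd with
  | nil => rfl
  | cons k ks ih =>
      rw [List.foldl_cons, List.foldl_cons, step_eq rd k h]
      exact ih _ (by rw [map_fst_stepB]; exact h)

-- Sequencing the whole-list rewrites = one map applying, per element, the pairs that hit it.
theorem foldl_map_comm (ks : List (String × String)) (rd : List (String × List (String × String))) :
    ks.foldl (fun rd kv => rd.map (fun p => if p.1 == kv.1 then (p.1, shorten_field p.2 kv.2) else p)) rd
      = rd.map (fun p => (p.1, ks.foldl (fun sec kv => if p.1 == kv.1 then shorten_field sec kv.2 else sec) p.2)) := by
  induction ks generalizing rd with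
  | nil => simp
  | cons k ks ih =>
      rw [List.foldl_cons, ih, List.map_map]
      refine List.map_congr_left (fun p _ => ?_)
      by_cases h : p.1 = k.1 <;> simp [h]

-- Per element: folding the three key pairs = folding the wanted fields of that section.
theorem per_section_eq (name : String) (sec : List (String × String)) :
    ([("info", "github"), ("info", "website"), ("contact", "linkedin")] : List (String × String)).foldl
        (fun s kv => if name == kv.1 then shorten_field s kv.2 else s) sec
      = (pvWanted.getD name []).foldl shorten_field sec := by
  by_cases h1 : name = "info"
  · subst h1; rfl
  · by_cases h2 : name = "contact"
    · subst h2; rfl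
    · have e1 : (("info" : String) == name) = false := beq_eq_false_iff_ne.mpr (fun e => h1 e.symm)
      have e2 : (("contact" : String) == name) = false := beq_eq_false_iff_ne.mpr (fun e => h2 e.symm)
      simp [pvWanted, PySem.Dict.getD, PySem.Dict.get?, List.find?, e1, e2, h1, h2]

-- ===== VERDICT (by name: the statement is the Claim_ definition above) =====
theorem shorten_uris_spec : Claim_equal_shorten_uris := by
  intro rd _ hpre
  unfold Spec_shorten_uris shorten_uris shorten_uris_alt
  rw [foldl_eq _ rd hpre.1, foldl_map_comm]
  exact List.map_congr_left (fun p _ => by rw [per_section_eq])
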